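-- pv_equiv track=rewrite | github.com/darkoss1/pysymex | benchmark_level2.py | level2_nested_loops
-- ===== SOURCE A (Python) =====
-- def level2_nested_loops(x: int, y: int) -> int:
--     """
--     Nested loops - tests path explosion.
--     """
--     total = 0
--     for i in range(x):
--         for j in range(y):
--             total += i * j
--
--     if total == 50:
--         assert True, "Nested loop target reached!"
--         return total
--     return total
-- ===== SOURCE B (Python) =====
-- def level2_nested_loops(x: int, y: int) -> int:
--     # closed form: sum_{i<x} sum_{j<y} i*j = T(x) * T(y), T(n) = n(n-1)/2
--     if x <= 1 or y <= 1:
--         return 0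
--     return (x * (x - 1) // 2) * (y * (y - 1) // 2)
-- ===== Notes on version B (the rewrite author's own statement) =====
-- stated objective: faster
-- what changed: Replaced the O(x*y) nested accumulation loops by the closed-form product of triangular numbers (x(x-1)/2)*(y(y-1)/2).
import Mathlib
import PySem

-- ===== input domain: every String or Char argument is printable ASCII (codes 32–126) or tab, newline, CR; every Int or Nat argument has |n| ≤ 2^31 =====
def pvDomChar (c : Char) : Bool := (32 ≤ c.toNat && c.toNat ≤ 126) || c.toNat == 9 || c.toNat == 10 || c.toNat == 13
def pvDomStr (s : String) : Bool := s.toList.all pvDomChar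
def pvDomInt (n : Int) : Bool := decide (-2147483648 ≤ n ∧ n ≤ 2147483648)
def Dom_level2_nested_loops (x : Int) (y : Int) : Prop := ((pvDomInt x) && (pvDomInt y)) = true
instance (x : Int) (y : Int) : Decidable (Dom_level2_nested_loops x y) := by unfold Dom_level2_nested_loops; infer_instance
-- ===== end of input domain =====

-- ===== PORT A =====
-- header: B replaces the nested loops by the closed form T(x)*T(y); proved equal on Dom (A is total).
def level2_nested_loops (x : Int) (y : Int) : Int :=
  let total : Int :=
    (PySem.List.pyRange 0 x 1).foldl
      (fun total i =>
        (PySem.List.pyRange 0 y 1).foldl (fun total j => total + i * j) total) 0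
  if total == 50 then total else total

-- ===== PORT B =====
def level2_nested_loops_alt (x : Int) (y : Int) : Int :=
  if x ≤ 1 ∨ y ≤ 1 then 0
  else (PySem.Int.floordiv (x * (x - 1)) 2) * (PySem.Int.floordiv (y * (y - 1)) 2)

-- ===== PRECONDITION & SPEC =====
def Spec_level2_nested_loops (x : Int) (y : Int) (out : Int) : Prop := out = level2_nested_loops_alt x y
instance (x : Int) (y : Int) (out : Int) : Decidable (Spec_level2_nested_loops x y out) := by unfold Spec_level2_nested_loops; infer_instance

-- ===== CLAIM (what is proved, stated in full; the proofs are below) =====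
def Claim_equal_level2_nested_loops : Prop := ∀ (x : Int) (y : Int), Dom_level2_nested_loops x y → Spec_level2_nested_loops x y (level2_nested_loops x y)

-- ===== LEMMAS AND PROOFS =====

-- inner loop: accumulating i*j over range(y) adds i * (sum of the range)
lemma inner_foldl_eq (y i t : Int) :
    (PySem.List.pyRange 0 y 1).foldl (fun t j => t + i * j) t
      = t + i * (PySem.List.pyRange 0 y 1).sum := by
  rw [PySem.List.foldl_add (g := fun j => i * j)]
  rw [show ((PySem.List.pyRange 0 y 1).map (fun j => i * j)).sum
        = i * ((PySem.List.pyRange 0 y 1).map id).sum from List.sum_map_mul_left _ id i]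
  simp

-- Gauss: twice the sum of range(n) is n(n-1)
lemma two_mul_sum_pyRange (m : Nat) :
    2 * ((PySem.List.pyRange 0 (m : Int) 1).sum) = (m : Int) * ((m : Int) - 1) := by
  induction m with
  | zero => simp [PySem.List.pyRange_one_eq_nil]
  | succ k ih =>
      have h : ((k + 1 : Nat) : Int) = (k : Int) + 1 := by push_cast; ring
      rw [h, PySem.List.pyRange_one_succ_right (by exact_mod_cast Int.natCast_nonneg k)]
      rw [List.sum_append]
      simp only [List.sum_cons, List.sum_nil, add_zero]
      ring_nf
      ring_nf at ih
      omega

lemma sum_pyRange_nonpos (n : Int) (h : n ≤ 1) :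
    (PySem.List.pyRange 0 n 1).sum = 0 := by
  rcases (by omega : n ≤ 0 ∨ n = 1) with h0 | h0
  · rw [PySem.List.pyRange_one_eq_nil h0]; rfl
  · subst h0; decide

lemma total_eq (x y : Int) :
    (PySem.List.pyRange 0 x 1).foldl
      (fun total i =>
        (PySem.List.pyRange 0 y 1).foldl (fun total j => total + i * j) total) 0
    = (PySem.List.pyRange 0 x 1).sum * (PySem.List.pyRange 0 y 1).sum := by
  simp only [inner_foldl_eq]
  rw [PySem.List.foldl_add (g := fun i => i * (PySem.List.pyRange 0 y 1).sum)]
  rw [show ((PySem.List.pyRange 0 x 1).map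
        (fun i => i * (PySem.List.pyRange 0 y 1).sum)).sum
      = ((PySem.List.pyRange 0 x 1).map id).sum * (PySem.List.pyRange 0 y 1).sum from
      List.sum_map_mul_right _ id _]
  simp

-- ===== VERDICT (by name: the statement is the Claim_ definition above) =====
theorem level2_nested_loops_spec : Claim_equal_level2_nested_loops := by
  intro x y _
  unfold Spec_level2_nested_loops level2_nested_loops level2_nested_loops_alt
  simp only [total_eq]
  rw [ite_self]
  split_ifs with h
  · rcases h with h | h
    · rw [sum_pyRange_nonpos x h]; ring
    · rw [sum_pyRange_nonpos y h]; ring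
  · rw [not_or] at h
    simp only [not_le] at h
    obtain ⟨hx, hy⟩ := h
    have hsx := two_mul_sum_pyRange x.toNat
    have hsy := two_mul_sum_pyRange y.toNat
    rw [Int.toNat_of_nonneg (by omega)] at hsx hsy
    have hfx : PySem.Int.floordiv (x * (x - 1)) 2 = (PySem.List.pyRange 0 x 1).sum := by
      have hev : (2 : Int) ∣ x * (x - 1) := by
        have h := Int.even_mul_succ_self (x - 1)
        simpa [sub_add_cancel, mul_comm] using h.two_dvd
      have h2 : PySem.Int.floordiv (x * (x - 1)) 2 * 2 = x * (x - 1) := by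
        simp [PySem.Int.floordiv, Int.fdiv_eq_ediv]
        exact Int.ediv_mul_cancel hev
      omega
    have hfy : PySem.Int.floordiv (y * (y - 1)) 2 = (PySem.List.pyRange 0 y 1).sum := by
      have hev : (2 : Int) ∣ y * (y - 1) := by
        have h := Int.even_mul_succ_self (y - 1)
        simpa [sub_add_cancel, mul_comm] using h.two_dvd
      have h2 : PySem.Int.floordiv (y * (y - 1)) 2 * 2 = y * (y - 1) := by
        simp [PySem.Int.floordiv, Int.fdiv_eq_ediv]
        exact Int.ediv_mul_cancel hev
      omega
    rw [hfx, hfy]
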